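-- pv_equiv track=rewrite | github.com/HugoChateauLaurent/conscious-chaining | model/vocabs.py | key_range
-- ===== SOURCE A (Python) =====
-- def key_range(start, stop, step=1):
--
-- 	assert start < stop
--
-- 	digits = []
-- 	digits.append('D'+str(step)+'.unitary()')
-- 	if step != start:
-- 		digits.append('D'+str(start)+'.unitary()')
-- 	for i in range(start+step, stop, step):
-- 		digits.append('D'+str(i)+'='+digits[-1].split('=')[0].split('.')[0]+'*D'+str(step)) # D_n = D_{n-step}*D_{step}
-- 	return digits
-- ===== SOURCE B (Python) =====
-- def key_range(start, stop, step=1):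
--
-- 	assert start < stop
--
-- 	digits = ['D'+str(step)+'.unitary()']
-- 	if step != start:
-- 		digits.append('D'+str(start)+'.unitary()')
-- 	digits += ['D'+str(i)+'=D'+str(i-step)+'*D'+str(step) for i in range(start+step, stop, step)]
-- 	return digits
-- ===== Notes on version B (the rewrite author's own statement) =====
-- stated objective: simpler
-- what changed: Each loop entry is computed directly from its index i as 'D{i}=D{i-step}*D{step}' in one comprehension, instead of A's self-referential parsing of the previous list element with split('=')/split('.').
import Mathlib
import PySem

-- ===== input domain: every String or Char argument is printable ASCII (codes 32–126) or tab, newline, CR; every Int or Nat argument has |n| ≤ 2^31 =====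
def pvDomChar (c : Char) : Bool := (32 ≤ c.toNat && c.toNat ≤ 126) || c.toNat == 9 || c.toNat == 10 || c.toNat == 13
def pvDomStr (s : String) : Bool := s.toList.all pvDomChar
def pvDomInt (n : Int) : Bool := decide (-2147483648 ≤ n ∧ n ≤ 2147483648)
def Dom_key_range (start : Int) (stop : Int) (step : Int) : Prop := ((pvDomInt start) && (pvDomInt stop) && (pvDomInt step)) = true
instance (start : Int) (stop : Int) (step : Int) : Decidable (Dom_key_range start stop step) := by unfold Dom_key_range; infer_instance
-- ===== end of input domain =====

-- B builds each loop entry directly from its index i ('D{i}=D{i-step}*D{step}') instead of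
-- A's parsing of the previous list element; objective: simpler (same cost).

-- ===== PORT A =====
-- digits[-1].split('=')[0].split('.')[0], step for step (the [0]/[-1] indexes are totalized
-- with defaults; they never fail since split is nonempty and digits is nonempty)
def keyRangeParsePrev (digits : List String) : String :=
  PySem.List.pyGetD
    ((PySem.Str.split?
        (PySem.List.pyGetD
          ((PySem.Str.split? ((PySem.List.pyGet? digits (-1)).getD "") "=").getD []) 0 "")
        ".").getD []) 0 ""

-- 'assert start < stop' and step = 0 raise in Python; those inputs are excluded by Pre_key_range
def key_range (start : Int) (stop : Int) (step : Int) : List String :=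
  let digits : List String := []
  let digits := digits ++ ["D" ++ PySem.Int.toStr step ++ ".unitary()"]
  let digits := if step ≠ start then digits ++ ["D" ++ PySem.Int.toStr start ++ ".unitary()"] else digits
  (PySem.List.pyRange (start + step) stop step).foldl
    (fun digits i =>
      digits ++ ["D" ++ PySem.Int.toStr i ++ "=" ++ keyRangeParsePrev digits
                 ++ "*D" ++ PySem.Int.toStr step])
    digits

-- ===== PORT B =====
def key_range_alt (start : Int) (stop : Int) (step : Int) : List String :=
  (["D" ++ PySem.Int.toStr step ++ ".unitary()"] ++
    (if step ≠ start then ["D" ++ PySem.Int.toStr start ++ ".unitary()"] else [])) ++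
  (PySem.List.pyRange (start + step) stop step).map
    (fun i => "D" ++ PySem.Int.toStr i ++ "=D" ++ PySem.Int.toStr (i - step)
              ++ "*D" ++ PySem.Int.toStr step)

-- ===== PRECONDITION & SPEC =====
-- A raises AssertionError unless start < stop, and range() raises ValueError when step = 0.
def Pre_key_range (start : Int) (stop : Int) (step : Int) : Prop := start < stop ∧ step ≠ 0
instance (start : Int) (stop : Int) (step : Int) : Decidable (Pre_key_range start stop step) := by
  unfold Pre_key_range; infer_instance
def pvWitness_key_range : Int × Int × Int := (1, 5, 1)

def Spec_key_range (start : Int) (stop : Int) (step : Int) (out : List String) : Prop :=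
  out = key_range_alt start stop step
instance (start : Int) (stop : Int) (step : Int) (out : List String) :
    Decidable (Spec_key_range start stop step out) := by unfold Spec_key_range; infer_instance

-- ===== CLAIM (what is proved, stated in full; the proofs are below) =====
def Claim_equal_key_range : Prop :=
  ∀ (start : Int) (stop : Int) (step : Int), Dom_key_range start stop step →
    Pre_key_range start stop step → Spec_key_range start stop step (key_range start stop step)

-- ===== LEMMAS AND PROOFS =====

-- the first field of the split('=')[0].split('.')[0] parse, on the char-list level
def keyTok (cs : List Char) : List Char :=
  (cs.takeWhile (fun x => x ≠ '=')).takeWhile (fun x => x ≠ '.')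

theorem splitOn_go_head (c : Char) :
    ∀ (fuel : Nat) (l cur : List Char) (hacc : List (List Char)),
      l.length < fuel →
      ∃ tail, PySem.Chars.splitOn.go [c] fuel l cur hacc =
        hacc.reverse ++ (cur.reverse ++ l.takeWhile (fun x => x ≠ c)) :: tail := by
  intro fuel
  induction fuel with
  | zero => intro l cur hacc h; omega
  | succ n ih =>
    intro l cur hacc h
    match l with
    | [] =>
      exact ⟨[], by simp [PySem.Chars.splitOn.go]⟩
    | ch :: rest =>
      by_cases hch : ch = c
      · subst hch
        obtain ⟨tail, htail⟩ := ih rest [] (cur.reverse :: hacc) (by simpa using Nat.lt_of_succ_lt_succ h)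
        refine ⟨rest.takeWhile (fun x => x ≠ ch) :: tail, ?_⟩
        simp [PySem.Chars.splitOn.go, List.isPrefixOf, htail]
      · obtain ⟨tail, htail⟩ := ih rest (ch :: cur) hacc (by simpa using Nat.lt_of_succ_lt_succ h)
        refine ⟨tail, ?_⟩
        simp [PySem.Chars.splitOn.go, List.isPrefixOf, hch, htail,
              Ne.symm hch]

theorem splitOn_single_head (s : List Char) (c : Char) :
    ∃ tail, PySem.Chars.splitOn s [c] = (s.takeWhile (fun x => x ≠ c)) :: tail := by
  obtain ⟨tail, h⟩ := splitOn_go_head c (s.length + 1) s [] [] (by omega)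
  exact ⟨tail, by simpa [PySem.Chars.splitOn] using h⟩

theorem parse_last (pre : List String) (last : String) :
    keyRangeParsePrev (pre ++ [last]) = String.ofList (keyTok last.toList) := by
  obtain ⟨t1, h1⟩ := splitOn_single_head last.toList '='
  obtain ⟨t2, h2⟩ := splitOn_single_head (last.toList.takeWhile (fun x => x ≠ '=')) '.'
  simp only [ne_eq, decide_not] at h1 h2
  simp [keyRangeParsePrev, PySem.Str.split?, PySem.Chars.split?, keyTok,
        PySem.List.pyGet?, PySem.List.pyIdx?, PySem.List.pyGetD, h1, h2]

-- every character of str(j) is '-' or a digit, hence neither '=' nor '.'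
theorem toChars_ne (j : Int) : ∀ x ∈ PySem.Int.toChars j, x ≠ '=' ∧ x ≠ '.' := by
  intro x hx
  unfold PySem.Int.toChars at hx
  have hdig : ∀ {m : Nat}, x ∈ Nat.toDigits 10 m → x ≠ '=' ∧ x ≠ '.' := by
    intro m hm
    have := Nat.isDigit_of_mem_toDigits (by norm_num) (by norm_num) hm
    constructor <;> rintro rfl <;> simp [Char.isDigit] at this
  split at hx
  · rcases List.mem_cons.mp hx with rfl | hx
    · exact ⟨by decide, by decide⟩
    · exact hdig hx
  · exact hdig hx

theorem takeWhile_append_all {p : Char → Bool} {xs ys : List Char}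
    (h : ∀ x ∈ xs, p x = true) : (xs ++ ys).takeWhile p = xs ++ ys.takeWhile p := by
  rw [List.takeWhile_append, List.takeWhile_eq_self_iff.mpr h]; simp

theorem all_ne_eq (j : Int) :
    ∀ x ∈ 'D' :: PySem.Int.toChars j, (decide (x ≠ '=') : Bool) = true := by
  intro x hx
  rcases List.mem_cons.mp hx with rfl | hx
  · decide
  · simp [(toChars_ne j x hx).1]

theorem all_ne_dot (j : Int) :
    ∀ x ∈ 'D' :: PySem.Int.toChars j, (decide (x ≠ '.') : Bool) = true := by
  intro x hx
  rcases List.mem_cons.mp hx with rfl | hx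
  · decide
  · simp [(toChars_ne j x hx).2]

theorem keyTok_unitary (j : Int) :
    keyTok ('D' :: (PySem.Int.toChars j ++ ".unitary()".toList)) = 'D' :: PySem.Int.toChars j := by
  unfold keyTok
  rw [show 'D' :: (PySem.Int.toChars j ++ ".unitary()".toList)
        = ('D' :: PySem.Int.toChars j) ++ ".unitary()".toList from rfl]
  rw [takeWhile_append_all (all_ne_eq j)]
  rw [show (".unitary()".toList.takeWhile (fun x => decide (x ≠ '='))) = ".unitary()".toList from by decide]
  rw [takeWhile_append_all (all_ne_dot j)]
  simp

theorem keyTok_eq (j : Int) (rest : List Char) :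
    keyTok ('D' :: (PySem.Int.toChars j ++ '=' :: rest)) = 'D' :: PySem.Int.toChars j := by
  unfold keyTok
  rw [show 'D' :: (PySem.Int.toChars j ++ '=' :: rest)
        = ('D' :: PySem.Int.toChars j) ++ '=' :: rest from rfl]
  rw [takeWhile_append_all (all_ne_eq j)]
  rw [show List.takeWhile (fun x => decide (x ≠ '=')) ('=' :: rest) = ([] : List Char) from by
        rw [List.takeWhile_cons_of_neg] ; decide]
  rw [List.append_nil, List.takeWhile_eq_self_iff.mpr (all_ne_dot j)]

theorem ofList_Dtok (j : Int) :
    String.ofList ('D' :: PySem.Int.toChars j) = "D" ++ PySem.Int.toStr j := by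
  conv_rhs => rw [← String.ofList_toList (s := "D" ++ PySem.Int.toStr j)]
  simp [PySem.Int.toList_toStr]

theorem loop_inv (step : Int) :
    ∀ (n : Nat) (j : Int) (pre : List String) (last : String),
      keyTok last.toList = 'D' :: PySem.Int.toChars j →
      ((List.range n).map (fun k : Nat => j + step + step * (k : Int))).foldl
        (fun digits i =>
          digits ++ ["D" ++ PySem.Int.toStr i ++ "=" ++ keyRangeParsePrev digits
                     ++ "*D" ++ PySem.Int.toStr step])
        (pre ++ [last]) =
      (pre ++ [last]) ++
        ((List.range n).map (fun k : Nat => j + step + step * (k : Int))).map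
          (fun i => "D" ++ PySem.Int.toStr i ++ "=D" ++ PySem.Int.toStr (i - step)
                    ++ "*D" ++ PySem.Int.toStr step) := by
  intro n
  induction n with
  | zero => intro j pre last _; simp
  | succ n ih =>
    intro j pre last hlast
    rw [List.range_succ_eq_map]
    simp only [List.map_cons, List.foldl_cons, List.map_map]
    have hpar : keyRangeParsePrev (pre ++ [last]) = "D" ++ PySem.Int.toStr j := by
      rw [parse_last, hlast, ofList_Dtok]
    set a : Int := j + step + step * ((0 : Nat) : Int) with ha
    have haj : a = j + step := by push_cast [ha]; ring
    have hstr : "D" ++ PySem.Int.toStr a ++ "=" ++ keyRangeParsePrev (pre ++ [last])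
          ++ "*D" ++ PySem.Int.toStr step
        = "D" ++ PySem.Int.toStr a ++ "=D" ++ PySem.Int.toStr (a - step)
          ++ "*D" ++ PySem.Int.toStr step := by
      rw [hpar, show a - step = j from by omega]
      conv_lhs => rw [← String.ofList_toList (s := _ ++ PySem.Int.toStr step)]
      conv_rhs => rw [← String.ofList_toList (s := _ ++ PySem.Int.toStr step)]
      simp
    have hnewlast : keyTok ("D" ++ PySem.Int.toStr a ++ "=D" ++ PySem.Int.toStr (a - step)
          ++ "*D" ++ PySem.Int.toStr step).toList = 'D' :: PySem.Int.toChars a := by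
      have : ("D" ++ PySem.Int.toStr a ++ "=D" ++ PySem.Int.toStr (a - step)
            ++ "*D" ++ PySem.Int.toStr step).toList
          = 'D' :: (PySem.Int.toChars a ++ '=' ::
              ('D' :: ((PySem.Int.toStr (a - step)).toList ++ '*' :: 'D' :: (PySem.Int.toStr step).toList))) := by
        simp [PySem.Int.toList_toStr]
      rw [this, keyTok_eq]
    have hfun : ((fun k : Nat => j + step + step * (k : Int)) ∘ Nat.succ)
        = (fun k : Nat => a + step + step * (k : Int)) := by
      funext k; simp only [Function.comp_apply, haj]; push_cast; ring
    rw [hstr, hfun]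
    have := ih a (pre ++ [last])
      ("D" ++ PySem.Int.toStr a ++ "=D" ++ PySem.Int.toStr (a - step) ++ "*D" ++ PySem.Int.toStr step)
      hnewlast
    simp only [List.map_map, List.append_assoc] at this ⊢
    rw [this]
    simp

-- ===== VERDICT (by name: the statement is the Claim_ definition above) =====
theorem unitary_tok (j : Int) :
    keyTok ("D" ++ PySem.Int.toStr j ++ ".unitary()").toList = 'D' :: PySem.Int.toChars j := by
  have : ("D" ++ PySem.Int.toStr j ++ ".unitary()").toList
      = 'D' :: (PySem.Int.toChars j ++ ".unitary()".toList) := by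
    simp [PySem.Int.toList_toStr]
  rw [this, keyTok_unitary]

theorem key_range_spec : Claim_equal_key_range := by
  intro start stop step _ hpre
  obtain ⟨hlt, hstep⟩ := hpre
  unfold Spec_key_range
  rcases lt_or_gt_of_ne hstep with hneg | hpos
  · -- step < 0 : the loop range is empty, both sides are the two-entry prefix
    have hr : PySem.List.pyRange (start + step) stop step = [] := by
      unfold PySem.List.pyRange
      rw [if_neg hstep]
      simp only [if_neg (by omega : ¬ (0:Int) < step), if_neg (by omega : ¬ stop < start + step)]
      simp
    simp only [key_range, key_range_alt, hr, List.foldl_nil, List.map_nil, List.append_nil,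
      List.nil_append]
    split_ifs <;> simp
  · have hr := PySem.List.pyRange_of_pos (start + step) stop hpos
    by_cases hss : step = start
    · subst hss
      simp only [key_range, key_range_alt, ne_eq, not_true_eq_false, ite_false,
        List.nil_append]
      rw [hr]
      have := loop_inv step (if step + step < stop then ((stop - (step + step) + step - 1) / step).toNat else 0)
        step [] ("D" ++ PySem.Int.toStr step ++ ".unitary()") (unitary_tok step)
      simpa using this
    · simp only [key_range, key_range_alt, ne_eq, hss, not_false_eq_true, if_true,
        List.nil_append]
      rw [hr]
      have := loop_inv step (if start + step < stop then ((stop - (start + step) + step - 1) / step).toNat else 0)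
        start ["D" ++ PySem.Int.toStr step ++ ".unitary()"]
        ("D" ++ PySem.Int.toStr start ++ ".unitary()") (unitary_tok start)
      simpa using this
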